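-- pv_equiv track=rewrite | github.com/jmarecek/ip-ensemble | clinicaloptimizer-dict.py | Connected_Arcs_init
-- ===== SOURCE A (Python) =====
-- def Connected_Arcs_init(v):
--     retval = []
--     for arc1 in v:
--         i = arc1[0]
--         ij = arc1[1]
--         for arc2 in v:
--             if arc1 != arc2:
--                jk = arc2[0]
--                k = arc2[1]
--                if ij == jk:
--                   ik = (i,k)
--                   if ik in v:
--                     tuple = ()
--                     tuple += (i,) + (ij,) + (k,)
--                     retval +=(tuple,)
--     return retval
-- ===== SOURCE B (Python) =====
-- def Connected_Arcs_init(v):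
--     by_first = {}
--     for arc in v:
--         by_first.setdefault(arc[0], []).append(arc)
--     arcset = set(v)
--     retval = []
--     for arc1 in v:
--         i = arc1[0]
--         ij = arc1[1]
--         for arc2 in by_first.get(ij, []):
--             if arc2 != arc1 and (i, arc2[1]) in arcset:
--                 retval.append((i, ij, arc2[1]))
--     return retval
-- ===== Notes on version B (the rewrite author's own statement) =====
-- stated objective: faster
-- what changed: Replaces the quadratic all-pairs scan with linear list membership by a dict indexing arcs by their first endpoint plus a set for O(1) membership, so only actually matching arc pairs are examined.
import Mathlib
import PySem

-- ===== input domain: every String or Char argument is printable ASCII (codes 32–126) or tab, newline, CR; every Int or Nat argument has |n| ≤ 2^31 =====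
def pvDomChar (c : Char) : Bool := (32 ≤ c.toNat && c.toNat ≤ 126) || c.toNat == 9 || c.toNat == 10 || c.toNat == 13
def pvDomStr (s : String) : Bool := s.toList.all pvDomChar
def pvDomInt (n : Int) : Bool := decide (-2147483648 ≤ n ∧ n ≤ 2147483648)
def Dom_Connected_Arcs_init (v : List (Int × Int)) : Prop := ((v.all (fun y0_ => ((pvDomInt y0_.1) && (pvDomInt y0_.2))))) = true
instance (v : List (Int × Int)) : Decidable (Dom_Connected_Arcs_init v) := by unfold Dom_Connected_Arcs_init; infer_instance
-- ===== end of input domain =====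

-- B indexes the arcs by their first endpoint (a dict) and keeps a set for membership,
-- so only genuinely matching arc pairs are scanned instead of all pairs.

-- ===== PORT A =====
-- literal transliteration: two nested loops over v, appending to retval
def Connected_Arcs_init (v : List (Int × Int)) : List (Int × Int × Int) :=
  v.foldl (fun retval arc1 =>
    v.foldl (fun r arc2 =>
      if arc1 ≠ arc2 then
        if arc1.2 = arc2.1 then
          if (arc1.1, arc2.2) ∈ v then r ++ [(arc1.1, arc1.2, arc2.2)] else r
        else r
      else r) retval) []

-- ===== PORT B =====
-- by_first.setdefault(arc[0], []).append(arc), i.e. one pass building the index dict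
def pvIndex (v : List (Int × Int)) : PySem.Dict Int (List (Int × Int)) :=
  v.foldl (fun d a => d.insert a.1 (d.getD a.1 [] ++ [a])) PySem.Dict.empty

def Connected_Arcs_init_alt (v : List (Int × Int)) : List (Int × Int × Int) :=
  let byFirst := pvIndex v
  let arcset := PySem.Set.ofList v
  v.foldl (fun retval arc1 =>
    (byFirst.getD arc1.2 []).foldl (fun r arc2 =>
      if arc2 ≠ arc1 ∧ PySem.Set.contains arcset (arc1.1, arc2.2) then
        r ++ [(arc1.1, arc1.2, arc2.2)]
      else r) retval) []

-- ===== PRECONDITION & SPEC =====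
def Spec_Connected_Arcs_init (v : List (Int × Int)) (out : List (Int × Int × Int)) : Prop := out = Connected_Arcs_init_alt v
instance (v : List (Int × Int)) (out : List (Int × Int × Int)) : Decidable (Spec_Connected_Arcs_init v out) := by unfold Spec_Connected_Arcs_init; infer_instance

-- ===== CLAIM (what is proved, stated in full; the proofs are below) =====
def Claim_equal_Connected_Arcs_init : Prop := ∀ (v : List (Int × Int)), Dom_Connected_Arcs_init v → Spec_Connected_Arcs_init v (Connected_Arcs_init v)

-- ===== LEMMAS AND PROOFS =====

-- the index dict's bucket for x is exactly the sublist of arcs with first endpoint x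
theorem pvIndex_getD (v : List (Int × Int)) (d : PySem.Dict Int (List (Int × Int))) (x : Int) :
    (v.foldl (fun d a => d.insert a.1 (d.getD a.1 [] ++ [a])) d).getD x []
      = d.getD x [] ++ v.filter (fun a => a.1 == x) := by
  induction v generalizing d with
  | nil => simp
  | cons a t ih =>
    simp only [List.foldl_cons, List.filter_cons, ih, PySem.Dict.getD_insert]
    by_cases h : a.1 = x
    · simp [h]
    · have : (a.1 == x) = false := by simpa using h
      simp [Ne.symm h, this]

-- folding over a filtered list = folding with the filter test inside the step
theorem foldl_filter_if {α β : Type} (p : α → Bool) (g : β → α → β) (l : List α) (b : β) :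
    (l.filter p).foldl g b = l.foldl (fun r a => if p a then g r a else r) b := by
  induction l generalizing b with
  | nil => rfl
  | cons a t ih =>
    by_cases h : p a <;> simp [h, ih]

theorem Connected_Arcs_init_eq (v : List (Int × Int)) :
    Connected_Arcs_init v = Connected_Arcs_init_alt v := by
  unfold Connected_Arcs_init Connected_Arcs_init_alt
  apply PySem.List.foldl_congr_mem
  intro retval arc1 _
  rw [pvIndex, pvIndex_getD v PySem.Dict.empty arc1.2, PySem.Dict.getD_empty, List.nil_append,
      foldl_filter_if]
  apply PySem.List.foldl_congr_mem
  intro r arc2 _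
  by_cases hf : arc2.1 = arc1.2
  · have hf' : (arc2.1 == arc1.2) = true := by simpa using hf
    simp only [hf', if_true]
    by_cases hne : arc1 = arc2
    · simp [hne]
    · by_cases hmem : (arc1.1, arc2.2) ∈ v
      · simp [hne, Ne.symm hne, hf.symm, hmem]
      · have : PySem.Set.contains (PySem.Set.ofList v) (arc1.1, arc2.2) = false := by
          rw [Bool.eq_false_iff, Ne, PySem.Set.contains_iff, PySem.Set.mem_ofList]
          exact hmem
        simp [hne, hf.symm, hmem]
  · have hf' : (arc2.1 == arc1.2) = false := by simpa using hf
    have hf2 : ¬ arc1.2 = arc2.1 := fun h => hf h.symm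
    simp [hf', hf2]

-- ===== VERDICT (by name: the statement is the Claim_ definition above) =====
theorem Connected_Arcs_init_spec : Claim_equal_Connected_Arcs_init := by
  intro v _
  unfold Spec_Connected_Arcs_init
  exact Connected_Arcs_init_eq v
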